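-- pv_equiv track=rewrite | github.com/fedenemi/Procesamiento-distribu-do | ejercicios_spark/anagramas.py | uniqueWords
-- ===== SOURCE A (Python) =====
-- def uniqueWords(ngrams):
--     r = []
--     l = []
--     for i in ngrams:
--         iset = set(i.split())
--         if set.difference(*(r+[iset])) != set([]):
--             r.append(iset)
--             l.append(i)
--     return l
-- ===== SOURCE B (Python) =====
-- def uniqueWords(ngrams):
--     # Incremental: keep only the first accepted word-set minus everything accepted since.
--     l = []
--     remaining = None
--     for i in ngrams:
--         words = set(i.split())
--         if remaining is None:
--             if words:
--                 remaining = words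
--                 l.append(i)
--         else:
--             rem2 = remaining - words
--             if rem2:
--                 remaining = rem2
--                 l.append(i)
--     return l
-- ===== Notes on version B (the rewrite author's own statement) =====
-- stated objective: faster
-- what changed: Instead of recomputing set.difference over the whole list of accepted sets at every step, B maintains the single 'remaining' set (first accepted set minus the union of later accepted sets) and updates it incrementally with one set subtraction per ngram.
import Mathlib
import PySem

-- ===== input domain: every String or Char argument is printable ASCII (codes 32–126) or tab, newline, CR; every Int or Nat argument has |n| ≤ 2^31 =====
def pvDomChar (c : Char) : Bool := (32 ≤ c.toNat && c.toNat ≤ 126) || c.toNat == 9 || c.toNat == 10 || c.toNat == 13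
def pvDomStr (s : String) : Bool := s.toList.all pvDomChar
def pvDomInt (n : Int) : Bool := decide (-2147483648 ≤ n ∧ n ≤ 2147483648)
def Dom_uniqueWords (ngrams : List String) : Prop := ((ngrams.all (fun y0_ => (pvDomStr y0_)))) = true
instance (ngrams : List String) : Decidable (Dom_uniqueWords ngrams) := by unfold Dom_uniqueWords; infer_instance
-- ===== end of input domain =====

-- B replaces A's per-step recomputation of set.difference over all accepted sets by one
-- incrementally maintained 'remaining' set (objective: faster, asymptotic).

-- ===== PORT A =====
-- set.difference(s0, s1, ..., sk) = s0 - s1 - ... - sk; the [] case is unreachable in A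
-- (the argument list r + [iset] is never empty), returning the empty set there is a totality guard.
def multiDiffA : List (PySem.Set String) → PySem.Set String
  | [] => PySem.Set.empty
  | h :: t => t.foldl PySem.Set.diff h

def stepA (st : List (PySem.Set String) × List String) (i : String) :
    List (PySem.Set String) × List String :=
  let iset := PySem.Set.ofList (PySem.Str.split₀ i)
  if PySem.Set.equal (multiDiffA (st.1 ++ [iset])) PySem.Set.empty then st
  else (st.1 ++ [iset], st.2 ++ [i])

def uniqueWords (ngrams : List String) : List String :=
  (ngrams.foldl stepA ([], [])).2

-- ===== PORT B =====
def stepB (st : Option (PySem.Set String) × List String) (i : String) :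
    Option (PySem.Set String) × List String :=
  let words := PySem.Set.ofList (PySem.Str.split₀ i)
  match st.1 with
  | none => if words.isEmpty then st else (some words, st.2 ++ [i])
  | some rem =>
      let rem2 := PySem.Set.diff rem words
      if rem2.isEmpty then st else (some rem2, st.2 ++ [i])

def uniqueWords_alt (ngrams : List String) : List String :=
  (ngrams.foldl stepB (none, [])).2

-- ===== PRECONDITION & SPEC =====
def Spec_uniqueWords (ngrams : List String) (out : List String) : Prop := out = uniqueWords_alt ngrams
instance (ngrams : List String) (out : List String) : Decidable (Spec_uniqueWords ngrams out) := by unfold Spec_uniqueWords; infer_instance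

-- ===== CLAIM (what is proved, stated in full; the proofs are below) =====
def Claim_equal_uniqueWords : Prop := ∀ (ngrams : List String), Dom_uniqueWords ngrams → Spec_uniqueWords ngrams (uniqueWords ngrams)

-- ===== LEMMAS AND PROOFS =====

-- B's state as a function of A's state: 'remaining' is the multi-difference of the accepted sets.
def absState (r : List (PySem.Set String)) : Option (PySem.Set String) :=
  match r with
  | [] => none
  | h :: t => some (t.foldl PySem.Set.diff h)

theorem equal_empty_eq_isEmpty (d : List String) :
    PySem.Set.equal d PySem.Set.empty = d.isEmpty := by
  cases d with
  | nil =>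
      have h : PySem.Set.equal ([] : List String) PySem.Set.empty = true :=
        (PySem.Set.equal_iff _ _).mpr (by intro x; simp [PySem.Set.empty])
      simp [h]
  | cons x d =>
      have h : PySem.Set.equal (x :: d) PySem.Set.empty = false := by
        cases hc : PySem.Set.equal (x :: d) PySem.Set.empty with
        | false => rfl
        | true =>
            have := ((PySem.Set.equal_iff _ _).mp hc x).mp (by simp)
            simp [PySem.Set.empty] at this
      simpa [PySem.Set.empty] using h

theorem multiDiffA_append (r : List (PySem.Set String)) (s : PySem.Set String) (hr : r ≠ []) :
    multiDiffA (r ++ [s]) =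
      PySem.Set.diff ((absState r).getD PySem.Set.empty) s := by
  cases r with
  | nil => exact absurd rfl hr
  | cons h t => simp [multiDiffA, absState, List.foldl_append]

theorem stepB_absState (r : List (PySem.Set String)) (l : List String) (i : String) :
    stepB (absState r, l) i = (absState (stepA (r, l) i).1, (stepA (r, l) i).2) := by
  cases r with
  | nil =>
      simp only [stepA, absState, stepB, List.nil_append, multiDiffA,
        List.foldl_nil, equal_empty_eq_isEmpty]
      cases hE : (PySem.Set.ofList (PySem.Str.split₀ i)).isEmpty <;> simp [hE, absState]
  | cons h t =>
      have hne : (h :: t : List (PySem.Set String)) ≠ [] := by simp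
      simp only [stepA, stepB, multiDiffA_append _ _ hne, absState, Option.getD_some,
        equal_empty_eq_isEmpty]
      cases hE : (PySem.Set.diff (t.foldl PySem.Set.diff h)
          (PySem.Set.ofList (PySem.Str.split₀ i))).isEmpty <;>
        simp [hE]

theorem foldl_stepB_absState (ngrams : List String)
    (r : List (PySem.Set String)) (l : List String) :
    ngrams.foldl stepB (absState r, l) =
      (absState (ngrams.foldl stepA (r, l)).1, (ngrams.foldl stepA (r, l)).2) := by
  induction ngrams generalizing r l with
  | nil => simp
  | cons i rest ih =>
      simp only [List.foldl_cons, stepB_absState]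
      exact ih (stepA (r, l) i).1 (stepA (r, l) i).2

-- ===== VERDICT (by name: the statement is the Claim_ definition above) =====
theorem uniqueWords_spec : Claim_equal_uniqueWords := by
  intro ngrams _
  show uniqueWords ngrams = uniqueWords_alt ngrams
  unfold uniqueWords uniqueWords_alt
  have h := foldl_stepB_absState ngrams [] []
  simp only [absState] at h
  rw [h]
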